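-- pv_equiv track=rewrite | github.com/levontumanyan/exercises | recursive/find_k_beauty.py | find_k_beauty
-- ===== SOURCE A (Python) =====
-- def find_k_beauty(num, current_num, k):
-- 	if current_num < pow(10,k):
-- 		return int(num % current_num == 0)
--
-- 	# new num is num % 10^k
-- 	try:
-- 		if num % (current_num % pow(10,k)) == 0:
-- 			return 1 + find_k_beauty(num, current_num // 10, k)
-- 	except:
-- 		return find_k_beauty(num, current_num // 10, k)
--
-- 	return find_k_beauty(num, current_num // 10, k)
-- ===== SOURCE B (Python) =====
-- def find_k_beauty(num, current_num, k):
--     # Iterative re-implementation: explicit accumulator loop over the same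
--     # right-to-left digit windows instead of stacked recursive calls.
--     count = 0
--     threshold = pow(10, k)
--     while current_num >= threshold:
--         window = current_num % threshold
--         try:
--             if num % window == 0:
--                 count += 1
--         except ZeroDivisionError:
--             pass
--         current_num //= 10
--     return count + int(num % current_num == 0)
-- ===== Notes on version B (the rewrite author's own statement) =====
-- stated objective: simpler
-- what changed: The stacked recursion over right-to-left digit windows is replaced by a single while loop with an explicit count accumulator (the final divisibility test stays outside the try, as in A's base case).
import Mathlib
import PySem

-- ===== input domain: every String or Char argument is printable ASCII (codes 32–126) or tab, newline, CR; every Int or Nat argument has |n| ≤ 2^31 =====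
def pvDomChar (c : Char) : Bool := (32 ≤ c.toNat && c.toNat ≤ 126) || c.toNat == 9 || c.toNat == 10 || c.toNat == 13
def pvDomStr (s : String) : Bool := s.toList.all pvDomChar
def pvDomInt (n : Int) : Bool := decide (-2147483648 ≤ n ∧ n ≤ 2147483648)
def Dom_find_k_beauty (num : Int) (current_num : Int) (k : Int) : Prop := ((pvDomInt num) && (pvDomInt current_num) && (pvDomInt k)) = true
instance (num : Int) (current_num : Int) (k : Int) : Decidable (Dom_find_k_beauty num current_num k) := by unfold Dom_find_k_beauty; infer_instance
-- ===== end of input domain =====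

-- B replaces A's stacked recursion over right-to-left digit windows by a single
-- accumulator loop (same windows, explicit count); return values proved equal on Pre_.

-- ===== PORT A =====
-- pow(10,k) is ported as 10 ^ k.toNat: exact for k ≥ 0 (Pre_ requires 1 ≤ k; for k < 0
-- Python's pow(10,k) is a float). The bare 'except' only ever catches the
-- ZeroDivisionError from window == 0, ported as the 'window = 0' branch.
def find_k_beauty (num : Int) (current_num : Int) (k : Int) : Int :=
  if _h : current_num < 10 ^ k.toNat then
    if PySem.Int.mod num current_num = 0 then 1 else 0
  else
    let window := PySem.Int.mod current_num (10 ^ k.toNat)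
    if window = 0 then
      find_k_beauty num (PySem.Int.floordiv current_num 10) k
    else if PySem.Int.mod num window = 0 then
      1 + find_k_beauty num (PySem.Int.floordiv current_num 10) k
    else
      find_k_beauty num (PySem.Int.floordiv current_num 10) k
termination_by current_num.toNat
decreasing_by
  all_goals
    have h1 : (1:Int) ≤ 10 ^ k.toNat := one_le_pow₀ (by norm_num)
    rw [PySem.Int.floordiv_eq_ediv_of_pos (by norm_num)]
    omega

-- ===== PORT B =====
-- the while loop of Source B: state (count, current_num); returns both at exit
def find_k_beauty_alt_loop (num : Int) (current_num : Int) (k : Int) (count : Int) : Int × Int :=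
  if _h : 10 ^ k.toNat ≤ current_num then
    let window := PySem.Int.mod current_num (10 ^ k.toNat)
    find_k_beauty_alt_loop num (PySem.Int.floordiv current_num 10) k
      (if window = 0 then count
       else if PySem.Int.mod num window = 0 then count + 1 else count)
  else
    (count, current_num)
termination_by current_num.toNat
decreasing_by
  have h1 : (1:Int) ≤ 10 ^ k.toNat := one_le_pow₀ (by norm_num)
  rw [PySem.Int.floordiv_eq_ediv_of_pos (by norm_num)]
  omega

def find_k_beauty_alt (num : Int) (current_num : Int) (k : Int) : Int :=
  let r := find_k_beauty_alt_loop num current_num k 0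
  r.1 + (if PySem.Int.mod num r.2 = 0 then 1 else 0)

-- ===== PRECONDITION & SPEC =====
-- Pre_ excludes exactly the inputs where A raises ZeroDivisionError: current_num == 0
-- (num % 0 in the base case) and k ≤ 0 with current_num > 0 (the recursion/loop drives
-- current_num to 0 and the final num % 0 is outside any try). On k ≤ 0 with
-- current_num < 0 both programs return immediately via the base case, so it is admitted.
def Pre_find_k_beauty (num : Int) (current_num : Int) (k : Int) : Prop :=
  (1 ≤ k ∧ current_num ≠ 0) ∨ (k ≤ 0 ∧ current_num < 0)
instance (num : Int) (current_num : Int) (k : Int) : Decidable (Pre_find_k_beauty num current_num k) := by unfold Pre_find_k_beauty; infer_instance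

def pvWitness_find_k_beauty : Int × Int × Int := (12, 1210, 2)

def Spec_find_k_beauty (num : Int) (current_num : Int) (k : Int) (out : Int) : Prop := out = find_k_beauty_alt num current_num k
instance (num : Int) (current_num : Int) (k : Int) (out : Int) : Decidable (Spec_find_k_beauty num current_num k out) := by unfold Spec_find_k_beauty; infer_instance

-- ===== CLAIM (what is proved, stated in full; the proofs are below) =====
def Claim_equal_find_k_beauty : Prop := ∀ (num : Int) (current_num : Int) (k : Int), Dom_find_k_beauty num current_num k → Pre_find_k_beauty num current_num k → Spec_find_k_beauty num current_num k (find_k_beauty num current_num k)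

-- ===== LEMMAS AND PROOFS =====

-- loop invariant: running the loop from any accumulator adds exactly A's recursive count
lemma find_k_beauty_loop_eq (num k : Int) :
    ∀ (n : Nat) (cn count : Int), cn.toNat = n →
      (find_k_beauty_alt_loop num cn k count).1 +
        (if PySem.Int.mod num (find_k_beauty_alt_loop num cn k count).2 = 0 then 1 else 0)
      = count + find_k_beauty num cn k := by
  intro n
  induction n using Nat.strong_induction_on with
  | _ n ih =>
    intro cn count hn
    by_cases h : cn < 10 ^ k.toNat
    · rw [find_k_beauty_alt_loop, find_k_beauty]
      simp only [dif_pos h, dif_neg (not_le.mpr h)]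
    · have h1 : (1:Int) ≤ 10 ^ k.toNat := one_le_pow₀ (by norm_num)
      have hlt : (PySem.Int.floordiv cn 10).toNat < n := by
        rw [PySem.Int.floordiv_eq_ediv_of_pos (by norm_num)]; omega
      rw [find_k_beauty_alt_loop, find_k_beauty]
      simp only [dif_pos (not_lt.mp h), dif_neg h]
      rw [ih _ hlt _ _ rfl]
      split_ifs <;> ring

-- ===== VERDICT (by name: the statement is the Claim_ definition above) =====
theorem find_k_beauty_spec : Claim_equal_find_k_beauty := by
  intro num current_num k _ _
  unfold Spec_find_k_beauty find_k_beauty_alt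
  have := find_k_beauty_loop_eq num k current_num.toNat current_num 0 rfl
  simpa using this.symm
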